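-- pv_equiv track=rewrite | github.com/bakunobu/exercise | 1400_basic_tasks/chap_6/6_35.py | count_sum_gt_five
-- ===== SOURCE A (Python) =====
-- def count_sum_gt_five(n:int) -> int:
--     total = 0
--     while n:
--         num = n % 10
--         if num > 5:
--             total += num
--         n //= 10
--     return(total)
-- ===== SOURCE B (Python) =====
-- def count_sum_gt_five(n: int) -> int:
--     total = 0
--     for c in str(n):
--         d = ord(c) - 48
--         if d > 5:
--             total += d
--     return total
-- ===== Notes on version B (the rewrite author's own statement) =====
-- stated objective: idiomatic
-- what changed: B scans the characters of str(n) once converting each character with ord, instead of A's arithmetic digit-peeling loop using modulus and floor division.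
import Mathlib
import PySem

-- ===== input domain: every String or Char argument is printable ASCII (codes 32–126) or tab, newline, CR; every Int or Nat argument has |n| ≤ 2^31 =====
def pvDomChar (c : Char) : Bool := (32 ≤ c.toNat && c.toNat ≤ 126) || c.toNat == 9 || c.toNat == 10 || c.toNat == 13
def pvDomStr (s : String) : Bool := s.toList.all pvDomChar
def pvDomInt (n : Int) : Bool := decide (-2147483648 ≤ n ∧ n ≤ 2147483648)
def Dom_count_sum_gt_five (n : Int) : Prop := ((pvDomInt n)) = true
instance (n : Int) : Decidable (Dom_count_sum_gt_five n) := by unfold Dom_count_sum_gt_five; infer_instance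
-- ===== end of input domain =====

-- B scans the characters of str(n) once instead of A's arithmetic digit-peeling loop (idiomatic; same cost).
-- Pre_ restricts to nonnegative n: on negative n the floor-division update never reaches zero, so Python A never terminates and returns nothing there.


-- ===== PORT A =====
-- the 'while n:' loop; fuel n.natAbs + 1 is enough for every n ≥ 0 (in Pre_); on n < 0 Python diverges
def pvALoop : Nat → Int → Int → Int
  | 0, _, total => total
  | fuel + 1, n, total =>
    if n = 0 then total
    else
      let num := PySem.Int.mod n 10
      pvALoop fuel (PySem.Int.floordiv n 10) (if num > 5 then total + num else total)

def count_sum_gt_five (n : Int) : Int := pvALoop (n.natAbs + 1) n 0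

-- ===== PORT B =====
-- the body of B's 'for c in str(n):' loop
def pvBStep (total : Int) (c : Char) : Int :=
  let d : Int := (c.toNat : Int) - 48
  if d > 5 then total + d else total

def count_sum_gt_five_alt (n : Int) : Int :=
  (PySem.Int.toChars n).foldl pvBStep 0

-- ===== PRECONDITION & SPEC =====
-- Pre_ excludes exactly the inputs on which Python A never returns (the while loop diverges for negative n)
def Pre_count_sum_gt_five (n : Int) : Prop := 0 ≤ n
instance (n : Int) : Decidable (Pre_count_sum_gt_five n) := by unfold Pre_count_sum_gt_five; infer_instance
def pvWitness_count_sum_gt_five : Int := 987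

def Spec_count_sum_gt_five (n : Int) (out : Int) : Prop := out = count_sum_gt_five_alt n
instance (n : Int) (out : Int) : Decidable (Spec_count_sum_gt_five n out) := by unfold Spec_count_sum_gt_five; infer_instance

-- ===== CLAIM (what is proved, stated in full; the proofs are below) =====
def Claim_equal_count_sum_gt_five : Prop := ∀ (n : Int), Dom_count_sum_gt_five n → Pre_count_sum_gt_five n → Spec_count_sum_gt_five n (count_sum_gt_five n)

-- ===== LEMMAS AND PROOFS =====

-- the common value: sum of the decimal digits of m that exceed 5
def pvS (m : Nat) : Int := (((Nat.digits 10 m).filter (fun d => 5 < d)).sum : Nat)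

theorem pvS_zero : pvS 0 = 0 := by decide

theorem pvS_step (m : Nat) (hm : 0 < m) :
    pvS m = (if 5 < m % 10 then ((m % 10 : Nat) : Int) else 0) + pvS (m / 10) := by
  unfold pvS
  rw [Nat.digits_def' (by norm_num : 1 < 10) hm, List.filter_cons]
  by_cases h : 5 < m % 10
  · rw [if_pos (by simpa using h), if_pos h, List.sum_cons]; push_cast; ring
  · rw [if_neg (by simpa using h), if_neg h, zero_add]

theorem pvS_small (m : Nat) (hm : m < 10) : pvS m = if 5 < m then (m : Int) else 0 := by
  rcases Nat.eq_zero_or_pos m with h | h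
  · subst h; simp [pvS_zero]
  · rw [pvS_step m h, Nat.mod_eq_of_lt hm, Nat.div_eq_of_lt hm, pvS_zero, add_zero]

theorem pvALoop_eq (m : Nat) : ∀ fuel total, m < fuel →
    pvALoop fuel (m : Int) total = total + pvS m := by
  induction m using Nat.strong_induction_on with
  | _ m ih =>
    intro fuel total hfuel
    match fuel, hfuel with
    | f + 1, hfuel =>
      rcases Nat.eq_zero_or_pos m with h0 | h0
      · subst h0; simp [pvALoop, pvS_zero]
      · have hm : ((m : Int) ≠ 0) := by exact_mod_cast h0.ne'
        simp only [pvALoop, if_neg hm]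
        rw [show PySem.Int.mod (m : Int) 10 = ((m % 10 : Nat) : Int) from
              PySem.Int.mod_natCast m 10,
            show PySem.Int.floordiv (m : Int) 10 = ((m / 10 : Nat) : Int) from
              PySem.Int.floordiv_natCast m 10]
        have hdiv : m / 10 < m := Nat.div_lt_self h0 (by norm_num)
        rw [ih (m / 10) hdiv f _ (by omega)]
        rw [pvS_step m h0]
        by_cases h : 5 < m % 10
        · rw [if_pos (by exact_mod_cast h), if_pos h]; ring
        · rw [if_neg (by exact_mod_cast h), if_neg h]; ring

theorem pvBStep_shift (t x : Int) (c : Char) : pvBStep (t + x) c = pvBStep t c + x := by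
  simp only [pvBStep]; split_ifs <;> ring

theorem pvFoldl_shift (l : List Char) : ∀ t x, List.foldl pvBStep (t + x) l = List.foldl pvBStep t l + x := by
  induction l with
  | nil => intro t x; rfl
  | cons c cs ih => intro t x; simp only [List.foldl_cons, pvBStep_shift]; exact ih _ _

theorem pvBStep_digitChar (t : Int) (d : Nat) (hd : d < 10) :
    pvBStep t (Nat.digitChar d) = if 5 < d then t + (d : Int) else t := by
  have h : ((Nat.digitChar d).toNat : Int) - 48 = (d : Int) := by
    interval_cases d <;> decide
  simp only [pvBStep, h]
  by_cases h5 : 5 < d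
  · rw [if_pos (by exact_mod_cast h5), if_pos h5]
  · rw [if_neg (by exact_mod_cast h5), if_neg h5]

theorem pvToDigitsCore_fold (m : Nat) : ∀ f acc t, m < f →
    List.foldl pvBStep t (Nat.toDigitsCore 10 f m acc) = List.foldl pvBStep t acc + pvS m := by
  induction m using Nat.strong_induction_on with
  | _ m ih =>
    intro f acc t hf
    match f, hf with
    | f + 1, hf =>
      simp only [Nat.toDigitsCore]
      have hmod : m % 10 < 10 := Nat.mod_lt _ (by norm_num)
      by_cases hq : m / 10 = 0
      · simp only [hq, if_true]
        rw [List.foldl_cons, pvBStep_digitChar t (m % 10) hmod]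
        have hsmall : m < 10 := by omega
        rw [Nat.mod_eq_of_lt hsmall, pvS_small m hsmall]
        split_ifs with h
        · rw [pvFoldl_shift]
        · rw [add_zero]
      · rw [if_neg hq]
        have hdiv : m / 10 < m := Nat.div_lt_self (by omega) (by norm_num)
        rw [ih (m / 10) hdiv f _ t (by omega)]
        rw [List.foldl_cons, pvBStep_digitChar t (m % 10) hmod]
        rw [pvS_step m (by omega)]
        split_ifs with h
        · rw [pvFoldl_shift]; ring
        · ring

-- ===== VERDICT (by name: the statement is the Claim_ definition above) =====
theorem count_sum_gt_five_spec : Claim_equal_count_sum_gt_five := by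
  intro n _ hpre
  unfold Spec_count_sum_gt_five count_sum_gt_five count_sum_gt_five_alt
  obtain ⟨m, rfl⟩ : ∃ m : Nat, n = (m : Int) := ⟨n.toNat, (Int.toNat_of_nonneg hpre).symm⟩
  rw [pvALoop_eq m _ 0 (by simp)]
  unfold PySem.Int.toChars
  rw [if_neg (by simp)]
  unfold Nat.toDigits
  rw [Int.toNat_natCast, pvToDigitsCore_fold m _ [] 0 (by omega)]
  simp
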